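-- pv_equiv track=rewrite | github.com/pypi-data/pypi-mirror-100 | packages/get-province-city-county/get_province_city_county-1.3.0-py3-none-any.whl/get_province_city_county/city.py | get_fillter_province
-- ===== SOURCE A (Python) =====
-- def get_fillter_province(data, h_province=None, h_city=None, h_xian=None, h_mh=None, bd=False):
--     fen = 0
--     rs = []
--     for ll in data:
--         province, province_score, city, city_score, xian, xian_score, mh = ll
--         if not bd:
--             if h_mh and not mh:
--                 continue
--             if not h_mh and mh:
--                 continue
--         if h_province and province not in h_province:
--             continue
--         if h_city and city not in h_city:
--             continue
--         if h_xian and xian not in h_xian: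
--             continue
--         num = province_score+city_score+xian_score
--         if fen == num:
--             rs.append(ll)
--         else:
--             fen = num
--             rs = [ll]
--     return rs
-- ===== SOURCE B (Python) =====
-- def get_fillter_province(data, h_province=None, h_city=None, h_xian=None, h_mh=None, bd=False):
--     # backward scan with early exit: collect the maximal trailing run of
--     # surviving rows whose score sum equals the last surviving row's sum
--     out = []
--     target = None
--     for ll in reversed(data):
--         if not ((bd or bool(h_mh) == bool(ll[6]))
--                 and (not h_province or ll[0] in h_province)
--                 and (not h_city or ll[2] in h_city)
--                 and (not h_xian or ll[4] in h_xian)):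
--             continue
--         s = ll[1] + ll[3] + ll[5]
--         if target is None:
--             target = s
--         elif s != target:
--             break
--         out.append(ll)
--     out.reverse()
--     return out
-- ===== Notes on version B (the rewrite author's own statement) =====
-- stated objective: alternative
-- what changed: B replaces A's forward fen/rs resetting state machine with a backward scan with early exit: it walks the data from the end, keeps surviving rows (same guards, expressed as one boolean condition) while their score sum equals the last surviving row's sum, breaks at the first mismatch, and reverses the collected run.
import Mathlib
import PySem

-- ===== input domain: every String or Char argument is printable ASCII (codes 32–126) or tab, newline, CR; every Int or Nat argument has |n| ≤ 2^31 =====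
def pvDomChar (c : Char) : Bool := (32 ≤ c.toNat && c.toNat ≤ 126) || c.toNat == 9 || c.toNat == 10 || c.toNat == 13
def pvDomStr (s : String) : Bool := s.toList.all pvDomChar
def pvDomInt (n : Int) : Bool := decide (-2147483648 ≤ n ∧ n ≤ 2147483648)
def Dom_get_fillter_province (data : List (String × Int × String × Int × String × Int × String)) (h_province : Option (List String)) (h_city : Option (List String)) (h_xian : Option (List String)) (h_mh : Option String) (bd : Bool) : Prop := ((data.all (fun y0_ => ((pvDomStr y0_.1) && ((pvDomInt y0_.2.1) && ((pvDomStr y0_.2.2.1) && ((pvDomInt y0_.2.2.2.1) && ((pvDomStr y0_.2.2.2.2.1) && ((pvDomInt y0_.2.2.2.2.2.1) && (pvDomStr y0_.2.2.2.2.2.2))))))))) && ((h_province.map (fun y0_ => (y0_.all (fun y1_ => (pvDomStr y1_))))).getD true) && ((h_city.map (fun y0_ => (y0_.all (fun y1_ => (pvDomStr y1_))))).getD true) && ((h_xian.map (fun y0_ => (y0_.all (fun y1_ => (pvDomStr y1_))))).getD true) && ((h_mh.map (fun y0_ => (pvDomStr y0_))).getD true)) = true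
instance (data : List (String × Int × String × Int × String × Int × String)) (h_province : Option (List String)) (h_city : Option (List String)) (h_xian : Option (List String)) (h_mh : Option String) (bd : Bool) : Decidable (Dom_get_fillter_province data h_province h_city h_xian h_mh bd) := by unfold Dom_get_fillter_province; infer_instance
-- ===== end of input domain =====

-- B replaces A's online fen/rs state machine with a backward scan with early exit:
-- it walks the data from the end, keeps surviving rows while their score sum equals the
-- last surviving row's sum, stops at the first mismatch, and reverses (objective: alternative).

-- Python truthiness of an Optional[str]: non-None and non-empty.
def pvOStrTruthy : Option String → Bool
  | none => false
  | some s => !(s == "")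

-- Python truthiness of an Optional[list]: non-None and non-empty.
def pvOListTruthy : Option (List String) → Bool
  | none => false
  | some l => !l.isEmpty

-- ===== PORT A =====
-- the loop body of A, one guarded step updating (fen, rs)
def pvStep (h_province : Option (List String)) (h_city : Option (List String)) (h_xian : Option (List String)) (h_mh : Option String) (bd : Bool) (st : Int × List (String × Int × String × Int × String × Int × String)) (ll : String × Int × String × Int × String × Int × String) : Int × List (String × Int × String × Int × String × Int × String) :=
  let fen := st.1
  let rs := st.2
  let province := ll.1
  let province_score := ll.2.1
  let city := ll.2.2.1
  let city_score := ll.2.2.2.1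
  let xian := ll.2.2.2.2.1
  let xian_score := ll.2.2.2.2.2.1
  let mh := ll.2.2.2.2.2.2
  if !bd && pvOStrTruthy h_mh && mh == "" then (fen, rs)
  else if !bd && !pvOStrTruthy h_mh && !(mh == "") then (fen, rs)
  else if pvOListTruthy h_province && !((h_province.getD []).contains province) then (fen, rs)
  else if pvOListTruthy h_city && !((h_city.getD []).contains city) then (fen, rs)
  else if pvOListTruthy h_xian && !((h_xian.getD []).contains xian) then (fen, rs)
  else
    let num := province_score + city_score + xian_score
    if fen == num then (fen, rs ++ [ll]) else (num, [ll])

def get_fillter_province (data : List (String × Int × String × Int × String × Int × String)) (h_province : Option (List String)) (h_city : Option (List String)) (h_xian : Option (List String)) (h_mh : Option String) (bd : Bool) : List (String × Int × String × Int × String × Int × String) :=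
  (data.foldl (pvStep h_province h_city h_xian h_mh bd) (0, [])).2

-- ===== PORT B =====
-- B's guard as one boolean expression (the `if not (... and ... and ...)` test in Source B)
def pvKeep (h_province : Option (List String)) (h_city : Option (List String)) (h_xian : Option (List String)) (h_mh : Option String) (bd : Bool) (ll : String × Int × String × Int × String × Int × String) : Bool :=
  (bd || (pvOStrTruthy h_mh == !(ll.2.2.2.2.2.2 == "")))
    && (!pvOListTruthy h_province || (h_province.getD []).contains ll.1)
    && (!pvOListTruthy h_city || (h_city.getD []).contains ll.2.2.1)
    && (!pvOListTruthy h_xian || (h_xian.getD []).contains ll.2.2.2.2.1)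

-- B's backward loop over reversed(data): `target` is the Optional sum fixed by the first
-- surviving row; the loop breaks at the first surviving row with a different sum.
def pvBack (h_province : Option (List String)) (h_city : Option (List String)) (h_xian : Option (List String)) (h_mh : Option String) (bd : Bool) : Option Int → List (String × Int × String × Int × String × Int × String) → List (String × Int × String × Int × String × Int × String)
  | _, [] => []
  | target, ll :: rest =>
    if pvKeep h_province h_city h_xian h_mh bd ll then
      let s := ll.2.1 + ll.2.2.2.1 + ll.2.2.2.2.2.1
      match target with
      | none => ll :: pvBack h_province h_city h_xian h_mh bd (some s) rest
      | some v => if s == v then ll :: pvBack h_province h_city h_xian h_mh bd (some v) rest else []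
    else pvBack h_province h_city h_xian h_mh bd target rest

def get_fillter_province_alt (data : List (String × Int × String × Int × String × Int × String)) (h_province : Option (List String)) (h_city : Option (List String)) (h_xian : Option (List String)) (h_mh : Option String) (bd : Bool) : List (String × Int × String × Int × String × Int × String) :=
  (pvBack h_province h_city h_xian h_mh bd none data.reverse).reverse

-- ===== PRECONDITION & SPEC =====
-- DecidableEq for the row type, built layer by layer (deep nested-product synthesis exceeds the default instance search)
def pvRowDecEq : DecidableEq (String × Int × String × Int × String × Int × String) := fun a b => instDecidableEqProd a b

def Spec_get_fillter_province (data : List (String × Int × String × Int × String × Int × String)) (h_province : Option (List String)) (h_city : Option (List String)) (h_xian : Option (List String)) (h_mh : Option String) (bd : Bool) (out : List (String × Int × String × Int × String × Int × String)) : Prop := out = get_fillter_province_alt data h_province h_city h_xian h_mh bd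
instance (data : List (String × Int × String × Int × String × Int × String)) (h_province : Option (List String)) (h_city : Option (List String)) (h_xian : Option (List String)) (h_mh : Option String) (bd : Bool) (out : List (String × Int × String × Int × String × Int × String)) : Decidable (Spec_get_fillter_province data h_province h_city h_xian h_mh bd out) := by unfold Spec_get_fillter_province; exact @List.hasDecEq _ pvRowDecEq _ _

-- ===== CLAIM (what is proved, stated in full; the proofs are below) =====
def Claim_equal_get_fillter_province : Prop := ∀ (data : List (String × Int × String × Int × String × Int × String)) (h_province : Option (List String)) (h_city : Option (List String)) (h_xian : Option (List String)) (h_mh : Option String) (bd : Bool), Dom_get_fillter_province data h_province h_city h_xian h_mh bd → Spec_get_fillter_province data h_province h_city h_xian h_mh bd (get_fillter_province data h_province h_city h_xian h_mh bd)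

-- ===== LEMMAS AND PROOFS =====

-- proof-side view of the guards: the row's score sum if it survives, none otherwise
def pvScore? (ll : String × Int × String × Int × String × Int × String) (h_province : Option (List String)) (h_city : Option (List String)) (h_xian : Option (List String)) (h_mh : Option String) (bd : Bool) : Option Int :=
  if pvKeep h_province h_city h_xian h_mh bd ll then some (ll.2.1 + ll.2.2.2.1 + ll.2.2.2.2.2.1) else none

-- A's step in terms of pvScore?
lemma pvStep_eq_score (h_province : Option (List String)) (h_city : Option (List String)) (h_xian : Option (List String)) (h_mh : Option String) (bd : Bool) (st : Int × List (String × Int × String × Int × String × Int × String)) (ll : String × Int × String × Int × String × Int × String) :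
    pvStep h_province h_city h_xian h_mh bd st ll =
      match pvScore? ll h_province h_city h_xian h_mh bd with
      | none => st
      | some num => if st.1 == num then (st.1, st.2 ++ [ll]) else (num, [ll]) := by
  unfold pvStep pvScore? pvKeep
  dsimp only
  cases bd <;>
    cases h1 : pvOStrTruthy h_mh <;>
    cases h2 : (ll.2.2.2.2.2.2 == "") <;>
    cases h3 : pvOListTruthy h_province <;>
    cases h4 : (h_province.getD []).contains ll.1 <;>
    cases h5 : pvOListTruthy h_city <;>
    cases h6 : (h_city.getD []).contains ll.2.2.1 <;>
    cases h7 : pvOListTruthy h_xian <;>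
    cases h8 : (h_xian.getD []).contains ll.2.2.2.2.1 <;>
    simp [h1, h2, h3, h4, h5, h6, h7, h8]

-- reference form of A's loop state: fen = score sum of the last kept row (0 if none),
-- rs = maximal trailing run of kept rows with that sum
def pvTrail (kept : List ((String × Int × String × Int × String × Int × String) × Int)) : Int × List (String × Int × String × Int × String × Int × String) :=
  match kept.reverse with
  | [] => (0, [])
  | p :: rest => (p.2, ((((p :: rest).takeWhile (fun q => q.2 == p.2)).map Prod.fst)).reverse)

lemma pvTrail_append (kept : List ((String × Int × String × Int × String × Int × String) × Int)) (x : String × Int × String × Int × String × Int × String) (num : Int) :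
    pvTrail (kept ++ [(x, num)]) =
      (if (pvTrail kept).1 == num then ((pvTrail kept).1, (pvTrail kept).2 ++ [x]) else (num, [x])) := by
  unfold pvTrail
  rw [List.reverse_append]
  cases h : kept.reverse with
  | nil =>
      simp only [List.append_nil]
      by_cases h0 : (0 : Int) = num
      · subst h0; simp
      · simp [h0]
  | cons p rest =>
      simp only [List.reverse_cons]
      by_cases hpn : p.2 = num
      · simp [hpn]
      · simp [hpn]

lemma pvMain (h_province : Option (List String)) (h_city : Option (List String)) (h_xian : Option (List String)) (h_mh : Option String) (bd : Bool) (data : List (String × Int × String × Int × String × Int × String)) :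
    data.foldl (pvStep h_province h_city h_xian h_mh bd) (0, []) =
      pvTrail (data.filterMap (fun ll => (pvScore? ll h_province h_city h_xian h_mh bd).map (fun s => (ll, s)))) := by
  induction data using List.reverseRecOn with
  | nil => rfl
  | append_singleton xs x ih =>
      rw [List.foldl_append, List.filterMap_append, ih]
      simp only [List.foldl_cons, List.foldl_nil, List.filterMap_cons, List.filterMap_nil]
      rw [pvStep_eq_score]
      cases hx : pvScore? x h_province h_city h_xian h_mh bd with
      | none => simp
      | some num => simp [pvTrail_append]

-- B's loop with a fixed target v takes precisely the kept prefix with sum v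
lemma pvBack_some (h_province : Option (List String)) (h_city : Option (List String)) (h_xian : Option (List String)) (h_mh : Option String) (bd : Bool) (v : Int) (l : List (String × Int × String × Int × String × Int × String)) :
    pvBack h_province h_city h_xian h_mh bd (some v) l =
      ((l.filterMap (fun ll => (pvScore? ll h_province h_city h_xian h_mh bd).map (fun s => (ll, s)))).takeWhile (fun q => q.2 == v)).map Prod.fst := by
  induction l with
  | nil => rfl
  | cons ll rest ih =>
      unfold pvBack pvScore?
      simp only [List.filterMap_cons]
      cases hk : pvKeep h_province h_city h_xian h_mh bd ll with
      | false => simpa [hk, pvScore?] using ih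
      | true =>
          simp only [hk, Option.map_some, if_true]
          by_cases hs : ll.2.1 + ll.2.2.2.1 + ll.2.2.2.2.2.1 = v
          · simp [hs, List.takeWhile_cons, ih, pvScore?]
          · simp [hs, List.takeWhile_cons]

-- B's loop before the target is fixed
lemma pvBack_none (h_province : Option (List String)) (h_city : Option (List String)) (h_xian : Option (List String)) (h_mh : Option String) (bd : Bool) (l : List (String × Int × String × Int × String × Int × String)) :
    pvBack h_province h_city h_xian h_mh bd none l =
      match l.filterMap (fun ll => (pvScore? ll h_province h_city h_xian h_mh bd).map (fun s => (ll, s))) with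
      | [] => []
      | p :: rest => (((p :: rest).takeWhile (fun q => q.2 == p.2)).map Prod.fst) := by
  induction l with
  | nil => rfl
  | cons ll rest ih =>
      unfold pvBack pvScore?
      simp only [List.filterMap_cons]
      cases hk : pvKeep h_province h_city h_xian h_mh bd ll with
      | false => simpa [hk, pvScore?] using ih
      | true =>
          simp only [hk, Option.map_some, if_true]
          simp [List.takeWhile_cons, pvBack_some, pvScore?]

theorem get_fillter_province_spec : Claim_equal_get_fillter_province := by
  intro data h_province h_city h_xian h_mh bd _
  show get_fillter_province data h_province h_city h_xian h_mh bd = get_fillter_province_alt data h_province h_city h_xian h_mh bd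
  unfold get_fillter_province get_fillter_province_alt
  rw [pvMain, pvBack_none]
  rw [List.filterMap_reverse]
  unfold pvTrail
  cases h : (data.filterMap (fun ll => (pvScore? ll h_province h_city h_xian h_mh bd).map (fun s => (ll, s)))).reverse with
  | nil => simp [h]
  | cons p rest => simp [h]
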